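-- pv_equiv track=rewrite | github.com/peteromallet/ArtAgents | astrid/core/task/run_audit.py | _run_status
-- ===== SOURCE A (Python) =====
-- from typing import Any, Optional, Sequence
--
-- def _run_status(events: list[dict[str, Any]]) -> str:
--     """Derive run status from terminal events."""
--     for e in events:
--         if e.get("kind") == "run_aborted":
--             return "aborted"
--     for e in events:
--         if e.get("kind") == "run_completed":
--             return "completed"
--     return "in-flight"
-- ===== SOURCE B (Python) =====
-- def _run_status(events: list[dict[str, object]]) -> str:
--     """Derive run status from terminal events: single pass with a completed flag."""
--     completed = False
--     for e in events:
--         kind = e.get("kind")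
--         if kind == "run_aborted":
--             return "aborted"
--         if kind == "run_completed":
--             completed = True
--     return "completed" if completed else "in-flight"
-- ===== Notes on version B (the rewrite author's own statement) =====
-- stated objective: simpler
-- what changed: Replaces A's two sequential scans with one pass that returns 'aborted' immediately and tracks a completed flag, deciding 'completed' vs 'in-flight' after the loop.
import Mathlib
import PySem

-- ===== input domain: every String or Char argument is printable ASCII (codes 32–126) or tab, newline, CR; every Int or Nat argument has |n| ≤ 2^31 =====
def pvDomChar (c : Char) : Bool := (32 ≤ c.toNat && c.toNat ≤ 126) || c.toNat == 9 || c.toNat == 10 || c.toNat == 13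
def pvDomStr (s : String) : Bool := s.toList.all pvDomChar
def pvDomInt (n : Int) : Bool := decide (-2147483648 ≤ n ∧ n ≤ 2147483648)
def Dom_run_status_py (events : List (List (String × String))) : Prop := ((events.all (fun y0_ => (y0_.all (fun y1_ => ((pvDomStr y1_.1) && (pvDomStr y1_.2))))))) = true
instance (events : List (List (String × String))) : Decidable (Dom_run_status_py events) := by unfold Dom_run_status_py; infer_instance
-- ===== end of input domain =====

-- B replaces A's two sequential scans with one pass keeping a completed flag; objective: simpler.

-- ===== PORT A =====
-- first scan: any event with kind == "run_aborted"
def runStatusScanAborted (events : List (List (String × String))) : Option String :=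
  match events with
  | [] => none
  | e :: rest =>
      if (PySem.Dict.mk e).get? "kind" == some "run_aborted" then some "aborted"
      else runStatusScanAborted rest

-- second scan: any event with kind == "run_completed"
def runStatusScanCompleted (events : List (List (String × String))) : Option String :=
  match events with
  | [] => none
  | e :: rest =>
      if (PySem.Dict.mk e).get? "kind" == some "run_completed" then some "completed"
      else runStatusScanCompleted rest

def run_status_py (events : List (List (String × String))) : String :=
  match runStatusScanAborted events with
  | some s => s
  | none =>
    match runStatusScanCompleted events with
    | some s => s
    | none => "in-flight"

-- ===== PORT B =====
def runStatusLoop (events : List (List (String × String))) (completed : Bool) : String :=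
  match events with
  | [] => if completed then "completed" else "in-flight"
  | e :: rest =>
      let kind := (PySem.Dict.mk e).get? "kind"
      if kind == some "run_aborted" then "aborted"
      else if kind == some "run_completed" then runStatusLoop rest true
      else runStatusLoop rest completed

def run_status_py_alt (events : List (List (String × String))) : String :=
  runStatusLoop events false

-- ===== PRECONDITION & SPEC =====
def Spec_run_status_py (events : List (List (String × String))) (out : String) : Prop := out = run_status_py_alt events
instance (events : List (List (String × String))) (out : String) : Decidable (Spec_run_status_py events out) := by unfold Spec_run_status_py; infer_instance

-- ===== CLAIM (what is proved, stated in full; the proofs are below) =====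
def Claim_equal_run_status_py : Prop := ∀ (events : List (List (String × String))), Dom_run_status_py events → Spec_run_status_py events (run_status_py events)

-- ===== LEMMAS AND PROOFS =====

theorem runStatusScanCompleted_some (events : List (List (String × String))) (s : String)
    (h : runStatusScanCompleted events = some s) : s = "completed" := by
  induction events with
  | nil => simp [runStatusScanCompleted] at h
  | cons e rest ih =>
    unfold runStatusScanCompleted at h
    by_cases hc : ((PySem.Dict.mk e).get? "kind" == some "run_completed")
    · simp [hc] at h; exact h.symm
    · simp [hc] at h; exact ih h

-- Main invariant: if the tail contains no aborted event, the loop yields the two-scan result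
-- with the flag accounting for completed events already seen.
theorem runStatusLoop_eq (events : List (List (String × String))) (completed : Bool)
    (h : runStatusScanAborted events = none) :
    runStatusLoop events completed =
      match runStatusScanCompleted events with
      | some s => s
      | none => if completed then "completed" else "in-flight" := by
  induction events generalizing completed with
  | nil => simp [runStatusLoop, runStatusScanCompleted]
  | cons e rest ih =>
    unfold runStatusScanAborted at h
    by_cases ha : (PySem.Dict.mk e).get? "kind" == some "run_aborted"
    · simp [ha] at h
    · simp [ha] at h
      by_cases hc : (PySem.Dict.mk e).get? "kind" == some "run_completed"
      · simp only [runStatusLoop, runStatusScanCompleted, ha, hc, if_true, if_false,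
          Bool.false_eq_true, ih _ h]
        cases h2 : runStatusScanCompleted rest with
        | some s => rw [runStatusScanCompleted_some rest s h2]
        | none => simp
      · simp [runStatusLoop, runStatusScanCompleted, ha, hc, ih _ h]

theorem runStatusLoop_aborted (events : List (List (String × String))) (completed : Bool)
    (h : runStatusScanAborted events = some "aborted") :
    runStatusLoop events completed = "aborted" := by
  induction events generalizing completed with
  | nil => simp [runStatusScanAborted] at h
  | cons e rest ih =>
    unfold runStatusScanAborted at h
    by_cases ha : (PySem.Dict.mk e).get? "kind" == some "run_aborted"
    · simp [runStatusLoop, ha]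
    · simp [ha] at h
      by_cases hc : (PySem.Dict.mk e).get? "kind" == some "run_completed"
      · simp [runStatusLoop, ha, hc, ih _ h]
      · simp [runStatusLoop, ha, hc, ih _ h]

theorem runStatusScanAborted_some (events : List (List (String × String))) (s : String)
    (h : runStatusScanAborted events = some s) : s = "aborted" := by
  induction events with
  | nil => simp [runStatusScanAborted] at h
  | cons e rest ih =>
    unfold runStatusScanAborted at h
    by_cases ha : (PySem.Dict.mk e).get? "kind" == some "run_aborted"
    · simp [ha] at h; exact h.symm
    · simp [ha] at h; exact ih h

-- ===== VERDICT (by name: the statement is the Claim_ definition above) =====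
theorem run_status_py_spec : Claim_equal_run_status_py := by
  intro events _
  unfold Spec_run_status_py run_status_py run_status_py_alt
  cases hA : runStatusScanAborted events with
  | some s =>
    have hs := runStatusScanAborted_some events s hA
    subst hs
    exact (runStatusLoop_aborted events false hA).symm
  | none =>
    rw [runStatusLoop_eq events false hA]
    cases runStatusScanCompleted events <;> simp
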